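-- pv_equiv track=rewrite | github.com/tonghuikang/meta-ai-hackercup-2024 | execution_code/duplicate_order/024.py | compute_f_H
-- ===== SOURCE A (Python) =====
-- MOD = 10**9 +7
--
-- def binom(n, k, factorial, inv_fact):
--     if k <0 or k >n:
--         return 0
--     return factorial[n] * inv_fact[k] % MOD * inv_fact[n -k] % MOD
--
-- def partial_binomial_sum(n, k, a, factorial, inv_fact):
--     # Computes sum_{c=0}^k C(n, c) * a^c mod MOD
--     # Using iterative approach
--     result = 0
--     term = 1  # C(n,0) * a^0
--     for c in range(0, k+1):
--         result = (result + term) % MOD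
--         if c ==k:
--             break
--         # Compute term * (n -c) / (c+1) *a mod MOD
--         term = term * (n -c) % MOD
--         inv = pow(c +1, MOD-2, MOD)
--         term = term * inv % MOD
--         term = term * a % MOD
--     return result
--
-- def compute_f_H(A, H, M1, M2, S, factorial, inv_fact):
--     f =0
--     min_x = max(0, H - M1, H - M2)
--     max_x = min(A, M1, M2)
--     for x in range(0, max_x +1):
--         if x > M1 or x > M2:
--             continue
--         C_Ax = binom(A, x, factorial, inv_fact) * pow(S-1, x, MOD) % MOD
--         # Calculate lower_a and lower_b
--         L_a = max(H - (M1 -x), 0)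
--         L_b = max(H - (M2 -x), 0)
--         if L_a + L_b > H:
--             continue
--         K = H - L_a - L_b
--         if K <0:
--             continue
--         # Now sum over a from L_a to H - L_b
--         # and for each a, sum over c=0 to K
--         # where c = H -a -b and b >= L_b
--         # which implies c <= H -a -L_b
--         sum_B =0
--         for a in range(L_a, H - L_b +1):
--             C_H_a = binom(H, a, factorial, inv_fact)
--             n = H -a
--             k = K
--             if k <0:
--                 continue
--             partial_sum = partial_binomial_sum(n, k, S -2, factorial, inv_fact)
--             sum_B = (sum_B + C_H_a * partial_sum) % MOD
--         f = (f + C_Ax * sum_B) % MOD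
--     return f
-- ===== SOURCE B (Python) =====
-- MOD = 10**9 + 7
--
-- def binom(n, k, factorial, inv_fact):
--     if k < 0 or k > n:
--         return 0
--     return factorial[n] * inv_fact[k] % MOD * inv_fact[n - k] % MOD
--
-- def compute_f_H(A, H, M1, M2, S, factorial, inv_fact):
--     # Column-wise DP: instead of running one scalar partial-binomial-sum loop per a
--     # (A's partial_binomial_sum), sweep c = 0..K ONCE over a vector of running
--     # (acc, term) states, one per a; each modular inverse is computed once per c.
--     f = 0
--     max_x = min(A, M1, M2)
--     for x in range(0, max_x + 1):
--         L_a = max(H - (M1 - x), 0)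
--         L_b = max(H - (M2 - x), 0)
--         if L_a + L_b > H:
--             continue
--         K = H - L_a - L_b
--         a_list = list(range(L_a, H - L_b + 1))
--         cells = [(a, 0, 1) for a in a_list]  # (a, acc, term) with n = H - a
--         for c in range(0, K + 1):
--             cells = [(a, (acc + term) % MOD, term) for (a, acc, term) in cells]
--             if c == K:
--                 break
--             inv = pow(c + 1, MOD - 2, MOD)
--             cells = [(a, acc, term * (H - a - c) % MOD * inv % MOD * (S - 2) % MOD)
--                      for (a, acc, term) in cells]
--         sum_B = 0
--         for (a, acc, term) in cells:
--             sum_B = (sum_B + binom(H, a, factorial, inv_fact) * acc) % MOD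
--         C_Ax = binom(A, x, factorial, inv_fact) * pow(S - 1, x, MOD) % MOD
--         f = (f + C_Ax * sum_B) % MOD
--     return f
-- ===== Notes on version B (the rewrite author's own statement) =====
-- stated objective: alternative
-- what changed: B replaces A's per-a scalar helper partial_binomial_sum with a transposed column-wise DP: it sweeps c = 0..K once over a vector of per-a (acc, term) states kept in one list, so each modular inverse pow(c+1, MOD-2, MOD) is computed once per c instead of once per (a, c) pair, and the per-a results are combined with binom(H, a) in a final pass.
-- outside the precondition, e.g. on compute_f_H(0, 6, 4, 4, 3, [1, 1, 1, 1, 1, 1, 1], [1, 1, 1, 1, 1]): A returns 22, B returns 22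
import Mathlib
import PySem

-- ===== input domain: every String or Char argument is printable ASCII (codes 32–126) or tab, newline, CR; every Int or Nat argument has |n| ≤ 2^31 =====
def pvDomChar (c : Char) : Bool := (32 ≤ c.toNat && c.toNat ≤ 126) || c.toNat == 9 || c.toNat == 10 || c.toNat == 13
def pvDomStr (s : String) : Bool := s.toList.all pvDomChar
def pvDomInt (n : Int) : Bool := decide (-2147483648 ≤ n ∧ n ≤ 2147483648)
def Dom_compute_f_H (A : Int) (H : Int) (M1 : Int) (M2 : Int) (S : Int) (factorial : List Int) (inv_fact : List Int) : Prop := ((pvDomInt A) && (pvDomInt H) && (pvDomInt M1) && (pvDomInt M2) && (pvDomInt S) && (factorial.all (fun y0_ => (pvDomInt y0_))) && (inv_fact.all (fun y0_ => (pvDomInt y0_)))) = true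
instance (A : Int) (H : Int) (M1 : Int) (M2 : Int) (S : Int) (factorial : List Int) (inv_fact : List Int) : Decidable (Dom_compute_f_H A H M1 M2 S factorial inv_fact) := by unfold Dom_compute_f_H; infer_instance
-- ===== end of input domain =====

-- B transposes the inner computation: instead of one scalar partial-binomial-sum loop per a,
-- it sweeps c = 0..K once over a vector of per-a (acc, term) states, computing each modular
-- inverse once per c instead of once per (a, c) pair (objective: alternative).

-- ===== PORT A =====
-- MOD = 10**9 + 7
def pvMOD : Int := 1000000007

-- binom(n, k, factorial, inv_fact); appears verbatim in both Pythons.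
-- list indexing via pyGetD _ _ 0: inside Pre_ every index is in range, so this is exact.
def pvBinom (n k : Int) (factorial inv_fact : List Int) : Int :=
  if k < 0 ∨ k > n then 0
  else PySem.Int.mod (PySem.Int.mod (PySem.List.pyGetD factorial n 0 * PySem.List.pyGetD inv_fact k 0) pvMOD
        * PySem.List.pyGetD inv_fact (n - k) 0) pvMOD

-- the body of partial_binomial_sum's loop on state (result, term, broken); the
-- 'break' at c == k sets the flag and later iterations are skipped.
def pvStepS (n k a c : Int) (st : Int × Int × Bool) : Int × Int × Bool :=
  if st.2.2 then st
  else
    let result := PySem.Int.mod (st.1 + st.2.1) pvMOD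
    if c = k then (result, st.2.1, true)
    else
      let term := PySem.Int.mod (st.2.1 * (n - c)) pvMOD
      let inv := PySem.Int.powMod (c + 1) 1000000005 pvMOD
      let term := PySem.Int.mod (term * inv) pvMOD
      let term := PySem.Int.mod (term * a) pvMOD
      (result, term, false)

-- partial_binomial_sum(n, k, a, factorial, inv_fact) (the tables are unused by it)
def pvPartialSum (n k a : Int) : Int :=
  ((PySem.List.pyRange 0 (k + 1) 1).foldl (fun st c => pvStepS n k a c st)
    ((0 : Int), (1 : Int), false)).1

-- pow(S-1, x, MOD) is powMod (S-1) x.toNat pvMOD: the loop only produces x ≥ 0, so toNat is exact there.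
def compute_f_H (A : Int) (H : Int) (M1 : Int) (M2 : Int) (S : Int) (factorial : List Int) (inv_fact : List Int) : Int :=
  let _min_x := max (max 0 (H - M1)) (H - M2)
  let max_x := min (min A M1) M2
  (PySem.List.pyRange 0 (max_x + 1) 1).foldl (fun f x =>
    if x > M1 ∨ x > M2 then f
    else
      let C_Ax := PySem.Int.mod (pvBinom A x factorial inv_fact * PySem.Int.powMod (S - 1) x.toNat pvMOD) pvMOD
      let L_a := max (H - (M1 - x)) 0
      let L_b := max (H - (M2 - x)) 0
      if L_a + L_b > H then f
      else
        let K := H - L_a - L_b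
        if K < 0 then f
        else
          let sum_B := (PySem.List.pyRange L_a (H - L_b + 1) 1).foldl (fun sum_B a =>
            let C_H_a := pvBinom H a factorial inv_fact
            let n := H - a
            let k := K
            if k < 0 then sum_B
            else PySem.Int.mod (sum_B + C_H_a * pvPartialSum n k (S - 2)) pvMOD) 0
          PySem.Int.mod (f + C_Ax * sum_B) pvMOD) 0

-- ===== PORT B =====
-- the body of B's c-sweep over the whole vector of (a, acc, term) cells: one
-- accumulate pass, the break at c == K, then one term-update pass sharing a single inverse.
def pvStepC (H S K : Int) (c : Int) (st : List (Int × Int × Int) × Bool) : List (Int × Int × Int) × Bool :=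
  if st.2 then st
  else
    let cells := st.1.map (fun p => (p.1, PySem.Int.mod (p.2.1 + p.2.2) pvMOD, p.2.2))
    if c = K then (cells, true)
    else
      let inv := PySem.Int.powMod (c + 1) 1000000005 pvMOD
      (cells.map (fun p => (p.1, p.2.1,
        PySem.Int.mod (PySem.Int.mod (PySem.Int.mod (p.2.2 * (H - p.1 - c)) pvMOD * inv) pvMOD * (S - 2)) pvMOD)), false)

def compute_f_H_alt (A : Int) (H : Int) (M1 : Int) (M2 : Int) (S : Int) (factorial : List Int) (inv_fact : List Int) : Int :=
  let max_x := min (min A M1) M2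
  (PySem.List.pyRange 0 (max_x + 1) 1).foldl (fun f x =>
    let L_a := max (H - (M1 - x)) 0
    let L_b := max (H - (M2 - x)) 0
    if L_a + L_b > H then f
    else
      let K := H - L_a - L_b
      let a_list := PySem.List.pyRange L_a (H - L_b + 1) 1
      let cells := ((PySem.List.pyRange 0 (K + 1) 1).foldl (fun st c => pvStepC H S K c st)
        (a_list.map (fun a => (a, (0 : Int), (1 : Int))), false)).1
      let sum_B := cells.foldl (fun s p =>
        PySem.Int.mod (s + pvBinom H p.1 factorial inv_fact * p.2.1) pvMOD) 0
      let C_Ax := PySem.Int.mod (pvBinom A x factorial inv_fact * PySem.Int.powMod (S - 1) x.toNat pvMOD) pvMOD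
      PySem.Int.mod (f + C_Ax * sum_B) pvMOD) 0

-- ===== PRECONDITION & SPEC =====
-- Pre_ excludes exactly the inputs on which A's table lookups can run off the end of
-- factorial/inv_fact (IndexError): when the x-loop runs it indexes with A, and when the
-- inner loop is ever entered it indexes with H.
def Pre_compute_f_H (A : Int) (H : Int) (M1 : Int) (M2 : Int) (S : Int) (factorial : List Int) (inv_fact : List Int) : Prop :=
  (0 ≤ A ∧ 0 ≤ M1 ∧ 0 ≤ M2) →
    ((A < (factorial.length : Int) ∧ A < (inv_fact.length : Int)) ∧
     (max (H - M1) 0 + max (H - M2) 0 ≤ H →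
        (H < (factorial.length : Int) ∧ H < (inv_fact.length : Int))))
instance (A : Int) (H : Int) (M1 : Int) (M2 : Int) (S : Int) (factorial : List Int) (inv_fact : List Int) : Decidable (Pre_compute_f_H A H M1 M2 S factorial inv_fact) := by unfold Pre_compute_f_H; infer_instance

def pvWitness_compute_f_H : Int × Int × Int × Int × Int × List Int × List Int :=
  (2, 2, 2, 2, 3, [1, 1, 1], [1, 1, 1])

def Spec_compute_f_H (A : Int) (H : Int) (M1 : Int) (M2 : Int) (S : Int) (factorial : List Int) (inv_fact : List Int) (out : Int) : Prop := out = compute_f_H_alt A H M1 M2 S factorial inv_fact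
instance (A : Int) (H : Int) (M1 : Int) (M2 : Int) (S : Int) (factorial : List Int) (inv_fact : List Int) (out : Int) : Decidable (Spec_compute_f_H A H M1 M2 S factorial inv_fact out) := by unfold Spec_compute_f_H; infer_instance

-- ===== CLAIM (what is proved, stated in full; the proofs are below) =====
def Claim_equal_compute_f_H : Prop := ∀ (A : Int) (H : Int) (M1 : Int) (M2 : Int) (S : Int) (factorial : List Int) (inv_fact : List Int), Dom_compute_f_H A H M1 M2 S factorial inv_fact → Pre_compute_f_H A H M1 M2 S factorial inv_fact → Spec_compute_f_H A H M1 M2 S factorial inv_fact (compute_f_H A H M1 M2 S factorial inv_fact)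

-- ===== LEMMAS AND PROOFS =====

-- the break/skip flag after one scalar step: set iff it was set or this is step c = k
theorem pvStepS_flag (n k a c : Int) (st : Int × Int × Bool) :
    (pvStepS n k a c st).2.2 = (st.2.2 || decide (c = k)) := by
  unfold pvStepS
  by_cases h1 : st.2.2 <;> by_cases h2 : c = k <;> simp [h1, h2]

-- one c-step of B's vector sweep acts on each cell exactly as one step of A's scalar loop
-- (with n = H - a, the term factor S - 2), and the global flag flips iff each cell's would.
theorem pv_step_eq (H S K c : Int) (l : List Int) (s : Int → Int × Int) (b : Bool) :
    pvStepC H S K c (l.map (fun a => (a, (s a).1, (s a).2)), b)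
      = (l.map (fun a => (a, (pvStepS (H - a) K (S - 2) c ((s a).1, (s a).2, b)).1,
                             (pvStepS (H - a) K (S - 2) c ((s a).1, (s a).2, b)).2.1)),
         b || decide (c = K)) := by
  unfold pvStepC pvStepS
  by_cases hb : b
  · simp [hb]
  · by_cases hc : c = K
    · simp only [hb, hc, Bool.false_eq_true, if_false, if_true, decide_true, Bool.or_true,
        List.map_map]
      refine Prod.ext ?_ rfl
      simp only [List.map_inj_left, Function.comp]
      intro a _; trivial
    · simp only [hb, hc, Bool.false_eq_true, if_false, decide_false, Bool.or_false,
        List.map_map]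
      refine Prod.ext ?_ rfl
      simp only [List.map_inj_left, Function.comp]
      intro a _; trivial

-- B's whole vector sweep computes, cell by cell, exactly A's scalar partial-sum loop.
theorem pv_sweep (H S K : Int) (cs : List Int) : ∀ (l : List Int) (s : Int → Int × Int) (b : Bool),
    (cs.foldl (fun st c => pvStepC H S K c st) (l.map (fun a => (a, (s a).1, (s a).2)), b)).1
      = l.map (fun a =>
          (a, (cs.foldl (fun st c => pvStepS (H - a) K (S - 2) c st) ((s a).1, (s a).2, b)).1,
              (cs.foldl (fun st c => pvStepS (H - a) K (S - 2) c st) ((s a).1, (s a).2, b)).2.1)) := by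
  induction cs with
  | nil => intro l s b; simp
  | cons c cs ih =>
    intro l s b
    have hst : ∀ a : Int,
        (((pvStepS (H - a) K (S - 2) c ((s a).1, (s a).2, b)).1,
          (pvStepS (H - a) K (S - 2) c ((s a).1, (s a).2, b)).2.1, b || decide (c = K)))
          = pvStepS (H - a) K (S - 2) c ((s a).1, (s a).2, b) := by
      intro a
      conv_rhs => rw [show pvStepS (H - a) K (S - 2) c ((s a).1, (s a).2, b)
        = ((pvStepS (H - a) K (S - 2) c ((s a).1, (s a).2, b)).1,
           (pvStepS (H - a) K (S - 2) c ((s a).1, (s a).2, b)).2.1,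
           (pvStepS (H - a) K (S - 2) c ((s a).1, (s a).2, b)).2.2) from rfl]
      rw [pvStepS_flag]
    simp only [List.foldl_cons]
    rw [pv_step_eq H S K c l s b]
    rw [ih l (fun a => ((pvStepS (H - a) K (S - 2) c ((s a).1, (s a).2, b)).1,
                        (pvStepS (H - a) K (S - 2) c ((s a).1, (s a).2, b)).2.1)) (b || decide (c = K))]
    apply List.map_congr_left
    intro a _
    rw [hst a]

theorem pv_main (A H M1 M2 S : Int) (factorial inv_fact : List Int) :
    compute_f_H A H M1 M2 S factorial inv_fact = compute_f_H_alt A H M1 M2 S factorial inv_fact := by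
  unfold compute_f_H compute_f_H_alt
  apply PySem.List.foldl_congr_mem
  intro acc x hx
  rw [PySem.List.mem_pyRange_one] at hx
  rw [if_neg (by omega : ¬ (x > M1 ∨ x > M2))]
  by_cases hp : max (H - (M1 - x)) 0 + max (H - (M2 - x)) 0 > H
  · rw [if_pos hp, if_pos hp]
  · rw [if_neg hp, if_neg hp]
    have hK : ¬ (H - max (H - (M1 - x)) 0 - max (H - (M2 - x)) 0 < 0) := by omega
    rw [if_neg hK]
    -- zeta-reduce both let-chains (defeq) to a clean equality of the two accumulations
    show
      PySem.Int.mod (acc + PySem.Int.mod (pvBinom A x factorial inv_fact * PySem.Int.powMod (S - 1) x.toNat pvMOD) pvMOD *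
        ((PySem.List.pyRange (max (H - (M1 - x)) 0) (H - max (H - (M2 - x)) 0 + 1) 1).foldl
          (fun sum_B a =>
            if (H - max (H - (M1 - x)) 0 - max (H - (M2 - x)) 0) < 0 then sum_B
            else PySem.Int.mod (sum_B + pvBinom H a factorial inv_fact *
              pvPartialSum (H - a) (H - max (H - (M1 - x)) 0 - max (H - (M2 - x)) 0) (S - 2)) pvMOD) 0)) pvMOD
      =
      PySem.Int.mod (acc + PySem.Int.mod (pvBinom A x factorial inv_fact * PySem.Int.powMod (S - 1) x.toNat pvMOD) pvMOD *
        (((PySem.List.pyRange 0 ((H - max (H - (M1 - x)) 0 - max (H - (M2 - x)) 0) + 1) 1).foldl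
            (fun st c => pvStepC H S (H - max (H - (M1 - x)) 0 - max (H - (M2 - x)) 0) c st)
            ((PySem.List.pyRange (max (H - (M1 - x)) 0) (H - max (H - (M2 - x)) 0 + 1) 1).map
              (fun a => (a, (0 : Int), (1 : Int))), false)).1.foldl
          (fun s p => PySem.Int.mod (s + pvBinom H p.1 factorial inv_fact * p.2.1) pvMOD) 0)) pvMOD
    have hs := pv_sweep H S (H - max (H - (M1 - x)) 0 - max (H - (M2 - x)) 0)
        (PySem.List.pyRange 0 ((H - max (H - (M1 - x)) 0 - max (H - (M2 - x)) 0) + 1) 1)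
        (PySem.List.pyRange (max (H - (M1 - x)) 0) (H - max (H - (M2 - x)) 0 + 1) 1)
        (fun _ => ((0 : Int), (1 : Int))) false
    dsimp only at hs
    rw [hs, List.foldl_map]
    refine congrArg (fun z => PySem.Int.mod (acc +
      PySem.Int.mod (pvBinom A x factorial inv_fact * PySem.Int.powMod (S - 1) x.toNat pvMOD) pvMOD * z) pvMOD) ?_
    apply PySem.List.foldl_congr_mem
    intro s a _
    dsimp only
    rw [if_neg hK]
    rfl

theorem pv_witness_ok :
    Dom_compute_f_H (pvWitness_compute_f_H.1) (pvWitness_compute_f_H.2.1) (pvWitness_compute_f_H.2.2.1) (pvWitness_compute_f_H.2.2.2.1) (pvWitness_compute_f_H.2.2.2.2.1) (pvWitness_compute_f_H.2.2.2.2.2.1) (pvWitness_compute_f_H.2.2.2.2.2.2) ∧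
    Pre_compute_f_H (pvWitness_compute_f_H.1) (pvWitness_compute_f_H.2.1) (pvWitness_compute_f_H.2.2.1) (pvWitness_compute_f_H.2.2.2.1) (pvWitness_compute_f_H.2.2.2.2.1) (pvWitness_compute_f_H.2.2.2.2.2.1) (pvWitness_compute_f_H.2.2.2.2.2.2) := by
  decide

-- ===== VERDICT (by name: the statement is the Claim_ definition above) =====
theorem compute_f_H_spec : Claim_equal_compute_f_H := by
  intro A H M1 M2 S factorial inv_fact _ _
  exact pv_main A H M1 M2 S factorial inv_fact
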